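-- pv_equiv track=rewrite | github.com/jeff-donovan/aoc-2024 | 13/13.1.py | make_machines
-- ===== SOURCE A (Python) =====
-- def make_machines(contents):
--     machines = []
--     new_machine = True
--     for line in contents.split('\n'):
--         if line == '':
--             new_machine = True
--             continue
--
--         if new_machine:
--             new_machine = False
--             machines.append({})
--
--         machine = machines[-1]
--         if 'Button A' in line:
--             coefficients = line.split('Button A: ')[1].split(', ')
--             x_coefficient = coefficients[0][2:]
--             y_coefficient = coefficients[1][2:]
--             machine['A'] = (int(x_coefficient), int(y_coefficient))
--
--         if 'Button B' in line:
--             coefficients = line.split('Button B: ')[1].split(', ')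
--             x_coefficient = coefficients[0][2:]
--             y_coefficient = coefficients[1][2:]
--             machine['B'] = (int(x_coefficient), int(y_coefficient))
--
--         if 'Prize' in line:
--             coords = line.split('Prize: ')[1].split(', ')
--             x_coord = coords[0][2:]
--             y_coord = coords[1][2:]
--             machine['Prize'] = (int(x_coord), int(y_coord))
--
--     return machines
-- ===== SOURCE B (Python) =====
-- def _parse_machine(lines):
--     machine = {}
--     for line in lines:
--         if 'Button A' in line:
--             coefficients = line.split('Button A: ')[1].split(', ')
--             machine['A'] = (int(coefficients[0][2:]), int(coefficients[1][2:]))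
--         if 'Button B' in line:
--             coefficients = line.split('Button B: ')[1].split(', ')
--             machine['B'] = (int(coefficients[0][2:]), int(coefficients[1][2:]))
--         if 'Prize' in line:
--             coords = line.split('Prize: ')[1].split(', ')
--             machine['Prize'] = (int(coords[0][2:]), int(coords[1][2:]))
--     return machine
--
--
-- def make_machines(contents):
--     groups = []
--     current = []
--     for line in contents.split('\n'):
--         if line == '':
--             if current:
--                 groups.append(current)
--                 current = []
--         else:
--             current.append(line)
--     if current:
--         groups.append(current)
--     return [_parse_machine(group) for group in groups]
-- ===== Notes on version B (the rewrite author's own statement) =====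
-- stated objective: simpler
-- what changed: Replaces the single stateful loop (new_machine flag with in-place mutation of machines[-1]) by a two-phase decomposition: first partition the lines into blocks of consecutive non-empty lines, then map an independent per-block parser over the blocks.
import Mathlib
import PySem

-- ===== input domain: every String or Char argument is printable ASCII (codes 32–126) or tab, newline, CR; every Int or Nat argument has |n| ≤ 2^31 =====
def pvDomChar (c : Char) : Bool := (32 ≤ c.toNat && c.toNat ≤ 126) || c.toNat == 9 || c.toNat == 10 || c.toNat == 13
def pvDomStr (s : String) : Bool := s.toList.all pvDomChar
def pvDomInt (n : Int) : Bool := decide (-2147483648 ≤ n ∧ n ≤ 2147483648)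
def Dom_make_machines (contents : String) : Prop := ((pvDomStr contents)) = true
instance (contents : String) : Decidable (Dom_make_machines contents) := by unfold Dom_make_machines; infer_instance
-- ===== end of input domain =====

-- B replaces A's stateful flag-and-mutate loop by a two-phase decomposition (partition lines
-- into blocks of consecutive non-empty lines, then map a per-block parser); objective: simpler.

-- ===== PORT A =====
-- s.split(sep) for a non-empty literal sep (Str.split? is none only for sep = "")
def pvSplit (s sep : String) : List String := (PySem.Str.split? s sep).getD []

-- shared per-line parsing (both Pythons contain this code verbatim):
-- line.split(sep)[1].split(', ') then the two fields with [2:] and int()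
def pvParseCoord (sep line : String) : Int × Int :=
  let parts := pvSplit line sep
  let cs := pvSplit (parts.getD 1 "") ", "
  ((PySem.Int.ofStr? (PySem.Str.slice (cs.getD 0 "") (some 2) none)).getD 0,
   (PySem.Int.ofStr? (PySem.Str.slice (cs.getD 1 "") (some 2) none)).getD 0)

-- the three 'if <pattern> in line' updates applied to one machine dict
def pvApplyLine (m : PySem.Dict String (Int × Int)) (line : String) : PySem.Dict String (Int × Int) :=
  let m1 := if PySem.Str.isIn "Button A" line then m.insert "A" (pvParseCoord "Button A: " line) else m
  let m2 := if PySem.Str.isIn "Button B" line then m1.insert "B" (pvParseCoord "Button B: " line) else m1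
  if PySem.Str.isIn "Prize" line then m2.insert "Prize" (pvParseCoord "Prize: " line) else m2

-- A's loop body: state = (machines, new_machine); machines[-1] is mutated in place
def pvStepA (st : List (PySem.Dict String (Int × Int)) × Bool) (line : String) :
    List (PySem.Dict String (Int × Int)) × Bool :=
  if line = "" then (st.1, true)
  else
    let machines := if st.2 then st.1 ++ [PySem.Dict.empty] else st.1
    (machines.dropLast ++ [pvApplyLine (machines.getLastD PySem.Dict.empty) line], false)

def make_machines (contents : String) : List (List (String × Int × Int)) :=
  (((pvSplit contents "\n").foldl pvStepA ([], true)).1).map PySem.Dict.items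

-- ===== PORT B =====
-- B's grouping loop body: state = (groups, current)
def pvGroupStep (st : List (List String) × List String) (line : String) :
    List (List String) × List String :=
  if line = "" then (if st.2.isEmpty then st else (st.1 ++ [st.2], []))
  else (st.1, st.2 ++ [line])

def make_machines_alt (contents : String) : List (List (String × Int × Int)) :=
  let st := (pvSplit contents "\n").foldl pvGroupStep ([], [])
  let groups := if st.2.isEmpty then st.1 else st.1 ++ [st.2]
  groups.map (fun g => (g.foldl pvApplyLine PySem.Dict.empty).items)

-- ===== PRECONDITION & SPEC =====
-- shape check for one 'if <pattern> in line' branch: the indexings and int() calls succeed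
def pvSegOK (sep line : String) : Bool :=
  let parts := pvSplit line sep
  let cs := pvSplit (parts.getD 1 "") ", "
  decide (2 ≤ parts.length) && decide (2 ≤ cs.length)
    && (PySem.Int.ofStr? (PySem.Str.slice (cs.getD 0 "") (some 2) none)).isSome
    && (PySem.Int.ofStr? (PySem.Str.slice (cs.getD 1 "") (some 2) none)).isSome

def pvLineOK (line : String) : Bool :=
  (!PySem.Str.isIn "Button A" line || pvSegOK "Button A: " line)
    && (!PySem.Str.isIn "Button B" line || pvSegOK "Button B: " line)
    && (!PySem.Str.isIn "Prize" line || pvSegOK "Prize: " line)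

-- Pre_ excludes exactly the inputs on which A raises (IndexError/ValueError): a line that
-- contains one of the pattern substrings but lacks the full separator, the second
-- comma-separated field, or a valid integer after the first two characters of a field.
def Pre_make_machines (contents : String) : Prop :=
  (pvSplit contents "\n").all pvLineOK = true
instance (contents : String) : Decidable (Pre_make_machines contents) := by
  unfold Pre_make_machines; infer_instance

def pvWitness_make_machines : String :=
  "Button A: X+94, Y+34\nButton B: X+22, Y+67\nPrize: X=8400, Y=5400\n\nButton A: X+26, Y+66"

def Spec_make_machines (contents : String) (out : List (List (String × Int × Int))) : Prop := out = make_machines_alt contents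
instance (contents : String) (out : List (List (String × Int × Int))) : Decidable (Spec_make_machines contents out) := by unfold Spec_make_machines; infer_instance

-- ===== CLAIM (what is proved, stated in full; the proofs are below) =====
def Claim_equal_make_machines : Prop := ∀ (contents : String), Dom_make_machines contents → Pre_make_machines contents → Spec_make_machines contents (make_machines contents)

-- ===== LEMMAS AND PROOFS =====

def pvMach (g : List String) : PySem.Dict String (Int × Int) :=
  g.foldl pvApplyLine PySem.Dict.empty

-- the coupling invariant between A's loop state and B's loop state
def pvInv (st1 : List (PySem.Dict String (Int × Int)) × Bool)
    (st2 : List (List String) × List String) : Prop :=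
  (st1.2 = true → st2.2 = [] ∧ st1.1 = st2.1.map pvMach) ∧
  (st1.2 = false → st2.2 ≠ [] ∧ st1.1 = st2.1.map pvMach ++ [pvMach st2.2])

lemma pvMach_append_one (g : List String) (line : String) :
    pvMach (g ++ [line]) = pvApplyLine (pvMach g) line := by
  simp [pvMach]

lemma pvInv_step (st1 : List (PySem.Dict String (Int × Int)) × Bool)
    (st2 : List (List String) × List String) (line : String)
    (h : pvInv st1 st2) : pvInv (pvStepA st1 line) (pvGroupStep st2 line) := by
  obtain ⟨h1, h2⟩ := h
  by_cases hline : line = ""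
  · subst hline
    cases hb : st1.2
    · obtain ⟨hne, hms⟩ := h2 hb
      have : st2.2.isEmpty = false := by
        cases h : st2.2 <;> simp_all [List.isEmpty]
      constructor
      · intro _
        simp [pvGroupStep, pvStepA, this, hms]
      · intro hc; simp [pvStepA] at hc
    · obtain ⟨hnil, hms⟩ := h1 hb
      have : st2.2.isEmpty = true := by simp [hnil]
      constructor
      · intro _; simp [pvGroupStep, pvStepA, hnil, hms]
      · intro hc; simp [pvStepA] at hc
  · cases hb : st1.2
    · obtain ⟨hne, hms⟩ := h2 hb
      constructor
      · intro hc; simp [pvStepA, hline] at hc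
      · intro _
        refine ⟨by simp [pvGroupStep, hline, hne], ?_⟩
        simp only [pvStepA, pvGroupStep, hline, hb]
        simp [hms, pvMach_append_one]
    · obtain ⟨hnil, hms⟩ := h1 hb
      constructor
      · intro hc; simp [pvStepA, hline] at hc
      · intro _
        refine ⟨by simp [pvGroupStep, hline], ?_⟩
        simp only [pvStepA, pvGroupStep, hline, hb]
        simp [hnil, hms, pvMach]
  
lemma pvInv_foldl (lines : List String)
    (st1 : List (PySem.Dict String (Int × Int)) × Bool)
    (st2 : List (List String) × List String)
    (h : pvInv st1 st2) : pvInv (lines.foldl pvStepA st1) (lines.foldl pvGroupStep st2) := by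
  induction lines generalizing st1 st2 with
  | nil => exact h
  | cons l rest ih => exact ih _ _ (pvInv_step _ _ l h)

-- ===== VERDICT (by name: the statement is the Claim_ definition above) =====
theorem make_machines_spec : Claim_equal_make_machines := by
  unfold Claim_equal_make_machines
  intro contents _ _
  unfold Spec_make_machines make_machines make_machines_alt
  have hinv : pvInv (([], true) : List (PySem.Dict String (Int × Int)) × Bool)
      (([], []) : List (List String) × List String) := by
    constructor <;> intro h <;> simp_all
  have h := pvInv_foldl (pvSplit contents "\n") _ _ hinv
  set st1 := (pvSplit contents "\n").foldl pvStepA ([], true) with hst1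
  set st2 := (pvSplit contents "\n").foldl pvGroupStep ([], []) with hst2
  obtain ⟨h1, h2⟩ := h
  cases hb : st1.2
  · obtain ⟨hne, hms⟩ := h2 hb
    have : st2.2.isEmpty = false := by cases h : st2.2 <;> simp_all [List.isEmpty]
    simp [this, hms, pvMach, List.map_map, Function.comp]
  · obtain ⟨hnil, hms⟩ := h1 hb
    have : st2.2.isEmpty = true := by simp [hnil]
    simp [this, hms, pvMach, List.map_map, Function.comp]
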